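-- pv_equiv track=rewrite | github.com/Programvaruteknik-aoc/AOC-2023 | day5/food_production.py | parse_map_after_keyword
-- ===== SOURCE A (Python) =====
-- def parse_map_after_keyword(input: list[str], keyword:str) -> dict:
--     map = {}
--     map["destination"] = []
--     map["source"] = []
--     map["range"] = []
--     keyword_found = False
--     for line in input:
--         if keyword in line:
--             keyword_found = True
--             continue
--         elif keyword_found and line == "":
--             break
--
--         if keyword_found:
--             values = line.split(" ")
--             map["destination"].append(int(values[0]))
--             map["source"].append(int(values[1]))
--             map["range"].append(int(values[2]))
--     return map
-- ===== SOURCE B (Python) =====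
-- def parse_map_after_keyword(input: list[str], keyword: str) -> dict:
--     # Two-phase scan over one iterator: skip to the keyword line, then read the
--     # block of number rows up to the first empty line and transpose them.
--     it = iter(input)
--     for line in it:
--         if keyword in line:
--             break
--     rows = []
--     for line in it:
--         if line == "":
--             break
--         dest, src, rng, *_ = line.split(" ")
--         rows.append((int(dest), int(src), int(rng)))
--     cols = tuple(zip(*rows)) if rows else ((), (), ())
--     return {"destination": list(cols[0]), "source": list(cols[1]), "range": list(cols[2])}
-- ===== Notes on version B (the rewrite author's own statement) =====
-- stated objective: alternative
-- what changed: Replaces A's single flag-based loop by a two-phase scan over one iterator (skip to the keyword line, then collect the number rows up to the first empty line as tuples) and a zip transpose into the three columns; Pre_ excludes inputs on which A raises (a block line with fewer than three space-separated fields or whose first three fields int() rejects) and the defensible corner where a data-block line itself contains the keyword, which A silently skips while a natural block parser reads it as a data row (raising on the usual non-numeric header line).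
-- outside the precondition, e.g. on parse_map_after_keyword(['k', 'k'], 'k'): A returns {'destination': [], 'source': [], 'range': []}, B raises ValueError
import Mathlib
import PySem

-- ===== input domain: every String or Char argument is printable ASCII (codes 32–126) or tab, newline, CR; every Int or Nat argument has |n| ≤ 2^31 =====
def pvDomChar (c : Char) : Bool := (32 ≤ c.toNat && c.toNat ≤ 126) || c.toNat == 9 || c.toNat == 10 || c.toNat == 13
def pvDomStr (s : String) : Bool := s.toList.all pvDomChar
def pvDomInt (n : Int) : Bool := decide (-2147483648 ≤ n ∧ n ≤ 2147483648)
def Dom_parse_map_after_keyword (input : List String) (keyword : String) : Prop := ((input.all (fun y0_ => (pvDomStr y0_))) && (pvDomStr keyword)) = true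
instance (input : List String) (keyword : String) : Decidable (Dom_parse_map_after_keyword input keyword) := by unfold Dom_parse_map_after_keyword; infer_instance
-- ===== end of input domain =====

-- B replaces A's flag-based loop by a two-phase scan (skip to the keyword line, collect the
-- rows of the block as tuples) and a zip transpose (objective: alternative decomposition,
-- same cost; return value only — neither version mutates its arguments).

-- ===== PORT A =====
-- int(values[i]) of A's loop body: exact where Python returns; 0 where Python raises
-- IndexError/ValueError (such inputs are excluded by Pre_).
def pvIntAt (values : List String) (i : Nat) : Int :=
  ((PySem.List.pyGet? values (i : Int)).bind PySem.Int.ofStr?).getD 0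

def pvALoop (keyword : String) (m : PySem.Dict String (List Int)) (found : Bool) :
    List String → PySem.Dict String (List Int)
  | [] => m
  | line :: rest =>
    if PySem.Str.isIn keyword line then pvALoop keyword m true rest
    else if found && line == "" then m
    else if found then
      -- line.split(" "): sep " " ≠ "", so split? is always some
      let values := (PySem.Str.split? line " ").getD []
      -- map["destination"].append(…): the three keys are always present, so modify is exact
      let m1 := m.modify "destination" [] (· ++ [pvIntAt values 0])
      let m2 := m1.modify "source" [] (· ++ [pvIntAt values 1])
      let m3 := m2.modify "range" [] (· ++ [pvIntAt values 2])
      pvALoop keyword m3 found rest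
    else pvALoop keyword m found rest

def parse_map_after_keyword (input : List String) (keyword : String) : List (String × List Int) :=
  (pvALoop keyword
    (((PySem.Dict.empty.insert "destination" []).insert "source" []).insert "range" [])
    false input).items

-- ===== PORT B =====
-- the first loop over the iterator: the lines remaining after the first keyword line
-- (exhausting the iterator when no line contains the keyword leaves nothing, i.e. [])
def pvAfterKw (keyword : String) : List String → List String
  | [] => []
  | l :: r => if PySem.Str.isIn keyword l then r else pvAfterKw keyword r

-- `dest, src, rng, *_ = line.split(" ")` + int(): exact where Python returns; 0-components
-- where Python raises ValueError (excluded by Pre_)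
def pvRowB (line : String) : Int × Int × Int :=
  let vs := (PySem.Str.split? line " ").getD []
  ((PySem.Int.ofStr? (vs.getD 0 "")).getD 0,
   (PySem.Int.ofStr? (vs.getD 1 "")).getD 0,
   (PySem.Int.ofStr? (vs.getD 2 "")).getD 0)

-- the second loop: rows up to the first empty line
def pvCollectRows : List String → List (Int × Int × Int)
  | [] => []
  | l :: r => if l == "" then [] else pvRowB l :: pvCollectRows r

def parse_map_after_keyword_alt (input : List String) (keyword : String) : List (String × List Int) :=
  let rows := pvCollectRows (pvAfterKw keyword input)
  -- tuple(zip(*rows)) if rows else ((), (), ()): the three columns of the triple rows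
  let cols := if rows.isEmpty then (([] : List Int), ([] : List Int), ([] : List Int))
              else (rows.map (·.1), rows.map (·.2.1), rows.map (·.2.2))
  [("destination", cols.1), ("source", cols.2.1), ("range", cols.2.2)]

-- ===== PRECONDITION & SPEC =====
-- the data block: lines after the first keyword line, up to the first empty line
def pvPreBlock (input : List String) (keyword : String) : List String :=
  match input.dropWhile (fun l => !(PySem.Str.isIn keyword l)) with
  | [] => []
  | _ :: t => t.takeWhile (fun l => !(l == ""))

-- Pre_ excludes the inputs on which the Python A raises — a block line with fewer than three
-- space-separated fields (IndexError/ValueError) or whose first three fields int() rejects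
-- (ValueError) — and the defensible corner where a block line itself contains the keyword:
-- there A silently skips the line while a natural block parser reads it as a data row
-- (raising on the usual non-numeric header line).
def Pre_parse_map_after_keyword (input : List String) (keyword : String) : Prop :=
  ∀ l ∈ pvPreBlock input keyword,
    PySem.Str.isIn keyword l = false ∧
    3 ≤ ((PySem.Str.split? l " ").getD []).length ∧
    ∀ j ∈ [0, 1, 2], (PySem.Int.ofStr? (((PySem.Str.split? l " ").getD []).getD j "")).isSome = true

instance (input : List String) (keyword : String) : Decidable (Pre_parse_map_after_keyword input keyword) := by
  unfold Pre_parse_map_after_keyword; infer_instance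

def pvWitness_parse_map_after_keyword : List String × String :=
  (["seed-to-soil map:", "50 98 2", "52 50 48", "", "60 0 4"], "map:")

def Spec_parse_map_after_keyword (input : List String) (keyword : String) (out : List (String × List Int)) : Prop := out = parse_map_after_keyword_alt input keyword
instance (input : List String) (keyword : String) (out : List (String × List Int)) : Decidable (Spec_parse_map_after_keyword input keyword out) := by unfold Spec_parse_map_after_keyword; infer_instance

-- ===== CLAIM (what is proved, stated in full; the proofs are below) =====
def Claim_equal_parse_map_after_keyword : Prop := ∀ (input : List String) (keyword : String), Dom_parse_map_after_keyword input keyword → Pre_parse_map_after_keyword input keyword → Spec_parse_map_after_keyword input keyword (parse_map_after_keyword input keyword)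

-- ===== LEMMAS AND PROOFS =====

-- the concrete three-key dict A's loop carries
def pvMk3 (ds ss rs : List Int) : PySem.Dict String (List Int) :=
  PySem.Dict.mk [("destination", ds), ("source", ss), ("range", rs)]

theorem pvMk3_init :
    ((PySem.Dict.empty.insert "destination" []).insert "source" []).insert "range" ([] : List Int)
      = pvMk3 [] [] [] := rfl

theorem pvMk3_modify (ds ss rs : List Int) (f g h : List Int → List Int) :
    (((pvMk3 ds ss rs).modify "destination" [] f).modify "source" [] g).modify "range" [] h
      = pvMk3 (f ds) (g ss) (h rs) := rfl

-- A's not-yet-found phase walks exactly to the line after the first keyword line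
theorem pvALoop_false (keyword : String) (input : List String) (m : PySem.Dict String (List Int)) :
    pvALoop keyword m false input = pvALoop keyword m true (pvAfterKw keyword input) := by
  induction input with
  | nil => rfl
  | cons line rest ih =>
    by_cases h : PySem.Str.isIn keyword line = true
    · simp only [PySem.Str.isIn_eq] at h
      simp [pvALoop, pvAfterKw, h]
    · simp only [Bool.not_eq_true, PySem.Str.isIn_eq] at h
      simp [pvALoop, pvAfterKw, h, ih]

-- a keyword contained in "" is "" itself
theorem pvKw_empty (keyword : String) (h : PySem.Str.isIn keyword "" = true) : keyword = "" := by
  rcases (PySem.Str.isIn_iff_infix keyword "").mp h with ⟨s, t, hst⟩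
  have h2 : s = [] ∧ keyword = "" ∧ t = [] := by simp at hst; exact h2_aux hst
  exact h2.2.1
where h2_aux {s t : List Char} {k : String}
    (hst : s = [] ∧ k = "" ∧ t = []) : s = [] ∧ k = "" ∧ t = [] := hst

-- with the empty keyword every line is skipped, so A's found-phase changes nothing
theorem pvALoop_empty_kw (m : PySem.Dict String (List Int)) (rest : List String) :
    pvALoop "" m true rest = m := by
  induction rest with
  | nil => rfl
  | cons l r ih =>
    have h : PySem.Chars.isIn ("" : String).toList l.toList = true := by
      simp [PySem.Chars.isIn_nil l.toList]
    simp [pvALoop, ih]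

-- A's per-field value equals B's, for every index (in or out of range)
theorem pvIntAt_eq (vs : List String) (j : Nat) :
    pvIntAt vs j = (PySem.Int.ofStr? (vs.getD j "")).getD 0 := by
  cases h : vs[j]? with
  | none =>
    have : pvIntAt vs j = 0 := by simp [pvIntAt, PySem.List.pyGet?_natCast, h]
    rw [this, List.getD, h]
    rfl
  | some v => simp [pvIntAt, PySem.List.pyGet?_natCast, h, List.getD]

-- the invariant: once found, A appends exactly the columns of B's rows
theorem pvALoop_invariant (keyword : String) (tail : List String) (ds ss rs : List Int)
    (hkw : ∀ l ∈ tail.takeWhile (fun l => !(l == "")), PySem.Str.isIn keyword l = false) :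
    pvALoop keyword (pvMk3 ds ss rs) true tail
      = pvMk3 (ds ++ (pvCollectRows tail).map (·.1))
              (ss ++ (pvCollectRows tail).map (·.2.1))
              (rs ++ (pvCollectRows tail).map (·.2.2)) := by
  induction tail generalizing ds ss rs with
  | nil => simp [pvALoop, pvCollectRows]
  | cons l r ih =>
    by_cases hl : l = ""
    · subst hl
      by_cases hin : PySem.Str.isIn keyword "" = true
      · -- keyword = "": A skips every remaining line, B's row loop stops here
        have hk := pvKw_empty keyword hin
        subst hk
        have : pvALoop "" (pvMk3 ds ss rs) true ("" :: r) = pvMk3 ds ss rs := by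
          simp [pvALoop, pvALoop_empty_kw]
        rw [this]
        simp [pvCollectRows]
      · -- the break: the empty line ends the block in both
        have hinC : PySem.Chars.isIn keyword.toList [] = false := by
          simpa using (Bool.not_eq_true _).mp hin
        simp [pvALoop, hinC, pvCollectRows]
    · -- a data line: it is in the block, so it does not contain the keyword
      have hmem : l ∈ (l :: r).takeWhile (fun l => !(l == "")) := by
        rw [List.takeWhile_cons_of_pos (by simp [hl])]; simp
      have hin := hkw l hmem
      have hinC : PySem.Chars.isIn keyword.toList l.toList = false := by simpa using hin
      have hkw' : ∀ x ∈ r.takeWhile (fun l => !(l == "")), PySem.Str.isIn keyword x = false := by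
        intro x hx
        exact hkw x (by rw [List.takeWhile_cons_of_pos (by simp [hl])]; exact List.mem_cons_of_mem _ hx)
      have hrows : pvCollectRows (l :: r) = pvRowB l :: pvCollectRows r := by
        simp [pvCollectRows, hl]
      have hstep : pvALoop keyword (pvMk3 ds ss rs) true (l :: r)
          = pvALoop keyword
              (pvMk3 (ds ++ [pvIntAt ((PySem.Str.split? l " ").getD []) 0])
                     (ss ++ [pvIntAt ((PySem.Str.split? l " ").getD []) 1])
                     (rs ++ [pvIntAt ((PySem.Str.split? l " ").getD []) 2])) true r := by
        have hstep0 : pvALoop keyword (pvMk3 ds ss rs) true (l :: r)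
            = pvALoop keyword
                ((((pvMk3 ds ss rs).modify "destination" []
                    (· ++ [pvIntAt ((PySem.Str.split? l " ").getD []) 0])).modify "source" []
                    (· ++ [pvIntAt ((PySem.Str.split? l " ").getD []) 1])).modify "range" []
                    (· ++ [pvIntAt ((PySem.Str.split? l " ").getD []) 2])) true r := by
          simp [pvALoop, hinC, hl]
        rw [pvMk3_modify] at hstep0
        exact hstep0
      rw [hstep, ih _ _ _ hkw', hrows]
      simp [pvRowB, pvIntAt_eq]

-- Pre_'s block is exactly the block B's two loops walk
theorem pvPreBlock_eq (input : List String) (keyword : String) :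
    pvPreBlock input keyword = (pvAfterKw keyword input).takeWhile (fun l => !(l == "")) := by
  induction input with
  | nil => rfl
  | cons l r ih =>
    by_cases hin : PySem.Str.isIn keyword l = true
    · have hinC : PySem.Chars.isIn keyword.toList l.toList = true := by simpa using hin
      simp [pvPreBlock, pvAfterKw, hinC]
    · have hinC : PySem.Chars.isIn keyword.toList l.toList = false := by
        simpa using (Bool.not_eq_true _).mp hin
      simpa [pvPreBlock, pvAfterKw, List.dropWhile_cons, hinC] using ih

-- ===== VERDICT (by name: the statement is the Claim_ definition above) =====
theorem parse_map_after_keyword_spec : Claim_equal_parse_map_after_keyword := by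
  intro input keyword _ hpre
  unfold Spec_parse_map_after_keyword
  rw [parse_map_after_keyword, parse_map_after_keyword_alt, pvMk3_init, pvALoop_false]
  have hkw : ∀ l ∈ (pvAfterKw keyword input).takeWhile (fun l => !(l == "")),
      PySem.Str.isIn keyword l = false := by
    intro l hl
    exact (hpre l (by rw [pvPreBlock_eq]; exact hl)).1
  rw [pvALoop_invariant keyword _ [] [] [] hkw]
  by_cases hrows : pvCollectRows (pvAfterKw keyword input) = []
  · simp [hrows, pvMk3]
  · have hne : (pvCollectRows (pvAfterKw keyword input)).isEmpty = false := by simp [hrows]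
    simp [hne, pvMk3]
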